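-- pv_equiv track=rewrite | github.com/anilece/infytq-PF | SUM_OF_CONSECUTIVE_NUMS.py | find_g
-- ===== SOURCE A (Python) =====
-- def find_factors(num):
--
--     factors = []
--     for i in range(2,(num+1)):
--         if(num%i==0):
--             factors.append(i)
--     return factors
--
-- def is_prime(num, i):
--
--     if(i==1):
--         return True
--     elif(num%i==0):
--         return False;
--     else:
--         return(is_prime(num,i-1))
--
-- def find_largest_prime_factor(list_of_factors):
--     re=[]
--     for i in list_of_factors:
--         a=is_prime(i,i//2)
--         if (a):
--             re.append(i)
--     if(len(re)>0):
--         maxx=max(re)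
--         return( maxx)
--     else:
--         return(0)
--
-- def find_f(num):
--     factor_list=find_factors(num)
--     numm=find_largest_prime_factor(factor_list)
--     return(numm)
--
-- def find_g(num):
--     num_list=[0]
--     sum=0
--     i=1
--     while(i <=9):
--         num_list.append(num)
--         res=find_f(num_list[i])
--         sum+=res
--         i+=1
--         num+=1
--     return(sum)
-- ===== SOURCE B (Python) =====
-- def _lpf(n):
--     # largest prime factor by dividing out the smallest divisor, O(sqrt n)
--     if n < 2:
--         return 0
--     d = 2
--     while d * d <= n:
--         if n % d == 0:
--             n //= d
--         else:
--             d += 1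
--     return n
--
--
-- def find_g(num):
--     total = 0
--     for n in range(num, num + 9):
--         total += _lpf(n)
--     return total
-- ===== Notes on version B (the rewrite author's own statement) =====
-- stated objective: faster
-- what changed: Instead of enumerating all divisors of each of the nine numbers and testing each divisor for primality by linear descending recursion, B extracts the largest prime factor directly by repeatedly dividing out the smallest divisor with trial division up to sqrt(n).
-- crash fix: On inputs whose nine-number window contains a number with a divisor whose is_prime recursion needs more than the available stack frames (e.g. a prime factor above 19991), A raises RecursionError while B returns the sum of largest prime factors (e.g. num=99991 -> 187971). — e.g. on find_g(99991): A raises RecursionError, B returns 187971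
import Mathlib
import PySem

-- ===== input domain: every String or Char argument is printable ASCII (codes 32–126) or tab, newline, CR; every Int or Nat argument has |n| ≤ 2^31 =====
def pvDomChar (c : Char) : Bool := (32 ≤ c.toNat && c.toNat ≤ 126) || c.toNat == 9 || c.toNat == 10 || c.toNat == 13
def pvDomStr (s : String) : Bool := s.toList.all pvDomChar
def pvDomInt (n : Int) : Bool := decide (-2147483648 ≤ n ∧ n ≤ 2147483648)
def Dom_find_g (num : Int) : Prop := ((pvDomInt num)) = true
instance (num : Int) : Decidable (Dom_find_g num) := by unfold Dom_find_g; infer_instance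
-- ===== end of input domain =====

-- B replaces A's divisor enumeration + recursive primality test by trial division up to
-- sqrt(n) dividing out the smallest divisor (the one timing run of this check measured B
-- faster at the largest rung).

-- ===== PORT A =====
def find_factors (num : Int) : List Int :=
  (PySem.List.pyRange 2 (num + 1) 1).foldl
    (fun factors i => if PySem.Int.mod num i == 0 then factors ++ [i] else factors) []

-- A's is_prime(num, i) recurses on i down to 1; ported with the second argument as the
-- Nat i.toNat (exact for i ≥ 1, the only way A ever calls it).
def is_primeAux (num : Int) : Nat → Bool
  | 0 => true        -- unreachable: A always calls with second argument ≥ 1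
  | 1 => true
  | (n + 2) => if PySem.Int.mod num ((n : Int) + 2) == 0 then false
               else is_primeAux num (n + 1)

def is_prime (num i : Int) : Bool := is_primeAux num i.toNat

def find_largest_prime_factor (list_of_factors : List Int) : Int :=
  let re := list_of_factors.foldl
    (fun re i => if is_prime i (PySem.Int.floordiv i 2) then re ++ [i] else re) []
  if 0 < re.length then (PySem.List.max? re (fun x => x)).getD 0 else 0

def find_f (num : Int) : Int := find_largest_prime_factor (find_factors num)

-- A's while loop runs exactly 9 iterations (i = 1..9); fuel 10 is a totality guard only.
def find_gLoop : Nat → List Int → Int → Int → Int → Int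
  | 0, _, s, _, _ => s
  | (fuel + 1), numList, s, i, num =>
    if i ≤ 9 then
      let numList' := numList ++ [num]
      let res := find_f (PySem.List.pyGetD numList' i 0)  -- num_list[i]; always in range here
      find_gLoop fuel numList' (s + res) (i + 1) (num + 1)
    else s

def find_g (num : Int) : Int := find_gLoop 10 [0] 0 1 num

-- ===== PORT B =====
-- Source B's while loop: divide out the smallest divisor while d*d ≤ n; the fuel argument is a
-- totality guard only (2*n - d shrinks every iteration, so fuel 2*n+1 is never exhausted).
def lpfLoopF : Nat → Nat → Nat → Nat
  | 0, n, _ => n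
  | (fuel + 1), n, d =>
    if 2 ≤ d ∧ d * d ≤ n then
      if n % d == 0 then lpfLoopF fuel (n / d) d else lpfLoopF fuel n (d + 1)
    else n

def lpf (n : Int) : Int := if n < 2 then 0 else (lpfLoopF (2 * n.toNat + 1) n.toNat 2 : Int)

def find_g_alt (num : Int) : Int :=
  (PySem.List.pyRange num (num + 9) 1).foldl (fun total n => total + lpf n) 0

-- ===== PRECONDITION & SPEC =====
-- helpers for Pre_: number-theoretic facts about the INPUT (neither port computes these).
-- sdFrom b n d: the smallest divisor of n in [d, sqrt n] (n itself if there is none);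
-- the first argument only bounds the recursion, d never exceeds sqrt n + 1.
def sdFrom : Nat → Nat → Nat → Nat
  | 0, n, _ => n | (b + 1), n, d => if d * d ≤ n then (if n % d == 0 then d else sdFrom b n (d + 1)) else n

def spfOf (i : Nat) : Nat := sdFrom i i 2  -- smallest prime factor of i (i itself if i is prime)

-- the stack frames A's is_prime(i, i//2) needs stay within the interpreter's budget:
-- i//2 frames if i is prime (the recursion reaches 1), i//2 - i/spf(i) + 1 if composite
def depthOK (i : Nat) : Bool :=
  if i ≤ 19991 then true
  else
    let s := spfOf i
    if s == i then false else decide (i / 2 + 1 ≤ 9995 + i / s)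

-- nOKStep b n d: every divisor pair (e, n/e) of n with d ≤ e, e*e ≤ n passes depthOK
def nOKStep : Nat → Nat → Nat → Bool
  | 0, _, _ => true | (b + 1), n, d => if d * d ≤ n then (if n % d == 0 && !(depthOK d && depthOK (n / d)) then false else nOKStep b n (d + 1)) else true

def nOK (n : Nat) : Bool := nOKStep n n 1

def preB (num : Int) : Bool :=
  (List.range 9).all (fun k => decide (num + (k : Int) < 2) || nOK (num + (k : Int)).toNat)

def Pre_find_g (num : Int) : Prop := preB num = true
instance (num : Int) : Decidable (Pre_find_g num) := by unfold Pre_find_g; infer_instance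
def pvWitness_find_g : Int := (100)

-- On inputs whose window contains a number with such a deep divisor (e.g. a prime factor
-- above 19991) A raises RecursionError while B returns the sum of largest prime factors.
def Raises_find_g (num : Int) : Prop := preB num = false
instance (num : Int) : Decidable (Raises_find_g num) := by unfold Raises_find_g; infer_instance
def pvRaiseWitness_find_g : Int := (99991)
def pvRaiseWitnessOut_find_g : Int := 187971

def Spec_find_g (num : Int) (out : Int) : Prop := out = find_g_alt num
instance (num : Int) (out : Int) : Decidable (Spec_find_g num out) := by unfold Spec_find_g; infer_instance

-- ===== CLAIM (what is proved, stated in full; the proofs are below) =====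
def Claim_equal_find_g : Prop := ∀ (num : Int), Dom_find_g num → Pre_find_g num → Spec_find_g num (find_g num)
def Claim_raises_find_g : Prop := (∀ (num : Int), Dom_find_g num → Raises_find_g num → ¬ Pre_find_g num) ∧ (Dom_find_g (pvRaiseWitness_find_g) ∧ Raises_find_g (pvRaiseWitness_find_g) ∧ find_g_alt (pvRaiseWitness_find_g) = pvRaiseWitnessOut_find_g)

-- ===== LEMMAS AND PROOFS =====

/-- greatest prime factor, as a characterising predicate -/
def IsGPF (m r : Nat) : Prop := r.Prime ∧ r ∣ m ∧ ∀ p : Nat, p.Prime → p ∣ m → p ≤ r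

theorem IsGPF_unique {m r s : Nat} (hr : IsGPF m r) (hs : IsGPF m s) : r = s :=
  le_antisymm (hs.2.2 r hr.1 hr.2.1) (hr.2.2 s hs.1 hs.2.1)

theorem lpfLoopF_isGPF (fuel n d : Nat) (hfuel : 2 * n - d ≤ fuel) (hn : 2 ≤ n) (hd : 2 ≤ d)
    (hlow : ∀ p : Nat, p.Prime → p ∣ n → d ≤ p) : IsGPF n (lpfLoopF fuel n d) := by
  induction fuel generalizing n d with
  | zero =>
    exfalso
    have hq2 : 2 ≤ n.minFac := (Nat.minFac_prime (by omega : n ≠ 1)).two_le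
    have h1 : d ≤ n.minFac := hlow n.minFac (Nat.minFac_prime (by omega)) (Nat.minFac_dvd n)
    have h2 : n.minFac ≤ n := Nat.minFac_le (by omega)
    omega
  | succ fuel ih =>
    rw [lpfLoopF]
    by_cases h : 2 ≤ d ∧ d * d ≤ n
    · rw [if_pos h]
      by_cases hmod : n % d == 0
      · rw [if_pos hmod]
        have hdvd : d ∣ n := Nat.dvd_of_mod_eq_zero (by simpa using hmod)
        have hdp : d.Prime := by
          rw [Nat.prime_def_minFac]
          refine ⟨hd, le_antisymm (Nat.minFac_le (by omega)) ?_⟩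
          exact hlow d.minFac (Nat.minFac_prime (by omega)) ((Nat.minFac_dvd d).trans hdvd)
        have hnd2 : 2 ≤ n / d := le_trans hd ((Nat.le_div_iff_mul_le (by omega)).mpr h.2)
        have h2 : 2 * (n / d) ≤ n := by
          calc 2 * (n / d) ≤ d * (n / d) := Nat.mul_le_mul_right _ h.1
            _ ≤ n := Nat.mul_div_le n d
        have h4 : 4 ≤ n := le_trans (Nat.mul_le_mul h.1 h.1) h.2
        have hdvd' : n / d ∣ n := ⟨d, (Nat.div_mul_cancel hdvd).symm⟩
        have hlow' : ∀ p : Nat, p.Prime → p ∣ n / d → d ≤ p :=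
          fun p hp hpd => hlow p hp (hpd.trans hdvd')
        obtain ⟨hrp, hrd, hrmax⟩ := ih (n / d) d (by omega) hnd2 hd hlow'
        refine ⟨hrp, hrd.trans hdvd', ?_⟩
        intro p hp hpn
        have : p ∣ d * (n / d) := by rwa [Nat.mul_div_cancel' hdvd]
        rcases (Nat.Prime.dvd_mul hp).mp this with hcase | hcase
        · have hpd : p = d := (Nat.prime_dvd_prime_iff_eq hp hdp).mp hcase
          exact hpd ▸ hlow' _ hrp hrd
        · exact hrmax p hp hcase
      · rw [if_neg hmod]
        have h4 : 4 ≤ n := le_trans (Nat.mul_le_mul h.1 h.1) h.2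
        refine ih n (d + 1) (by omega) hn (by omega) ?_
        intro p hp hpn
        have hdle : d ≤ p := hlow p hp hpn
        rcases Nat.eq_or_lt_of_le hdle with heq | hlt
        · exfalso
          apply hmod
          have : d ∣ n := heq ▸ hpn
          simpa using Nat.mod_eq_zero_of_dvd this
        · omega
    · rw [if_neg h]
      have hsq : ¬ d * d ≤ n := fun hc => h ⟨hd, hc⟩
      have hprime : n.Prime := by
        by_contra hnp
        have h1 : n.minFac * n.minFac ≤ n := by
          have := Nat.minFac_sq_le_self (by omega) hnp
          simpa [pow_two] using this
        have h2 : d ≤ n.minFac :=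
          hlow n.minFac (Nat.minFac_prime (by omega)) (Nat.minFac_dvd n)
        exact hsq (le_trans (Nat.mul_le_mul h2 h2) h1)
      exact ⟨hprime, dvd_rfl, fun p _ hpn => Nat.le_of_dvd (by omega) hpn⟩

theorem find_factors_eq (num : Int) :
    find_factors num =
      (PySem.List.pyRange 2 (num + 1) 1).filter (fun i => PySem.Int.mod num i == 0) := by
  simpa [find_factors] using
    PySem.List.foldl_append_if_eq_filter (fun i => PySem.Int.mod num i == 0)
      (PySem.List.pyRange 2 (num + 1) 1) []

theorem is_primeAux_iff (num : Int) (j : Nat) :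
    is_primeAux num j = true ↔ ∀ k : Nat, 2 ≤ k → k ≤ j → ¬ PySem.Int.mod num (k : Int) = 0 := by
  induction j with
  | zero => simp [is_primeAux]; omega
  | succ n ih =>
    match n, ih with
    | 0, _ => simp [is_primeAux]; omega
    | (m + 1), ih =>
      constructor
      · intro h k hk2 hkle
        rw [is_primeAux] at h
        split at h
        · exact absurd h (by simp)
        · rename_i hne
          rcases Nat.lt_or_ge k (m + 2) with hlt | hge
          · exact (ih.mp h) k hk2 (by omega)
          · have : k = m + 2 := by omega
            subst this
            simpa using hne
      · intro h
        rw [is_primeAux]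
        have hne : ¬ PySem.Int.mod num ((m : Int) + 2) = 0 := by
          have := h (m + 2) (by omega) (by omega)
          simpa [Nat.cast_add] using this
        simp only [beq_iff_eq, hne, if_false]
        exact ih.mpr (fun k hk2 hkle => h k hk2 (by omega))

theorem prime_iff_no_small_div (m : Nat) (hm : 2 ≤ m) :
    m.Prime ↔ ∀ k : Nat, 2 ≤ k → k ≤ m / 2 → ¬ k ∣ m := by
  constructor
  · intro hp k hk2 hkle hdvd
    rcases (Nat.Prime.eq_one_or_self_of_dvd hp k hdvd) with h1 | h1 <;> omega
  · intro h
    by_contra hnp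
    set q := m.minFac with hq
    have hq2 : 2 ≤ q := (Nat.minFac_prime (by omega : m ≠ 1)).two_le
    have hqd : q ∣ m := Nat.minFac_dvd m
    have hsq : q * q ≤ m := by
      have := Nat.minFac_sq_le_self (by omega) hnp
      simpa [pow_two] using this
    have hq_half : q ≤ m / 2 := by
      have : q * 2 ≤ m := le_trans (Nat.mul_le_mul_left q hq2) hsq
      omega
    exact h q hq2 hq_half hqd

theorem is_prime_iff (i : Int) (hi : 2 ≤ i) :
    is_prime i (PySem.Int.floordiv i 2) = true ↔ (i.toNat).Prime := by
  set m := i.toNat with hm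
  have hcast : i = (m : Int) := by omega
  have hm2 : 2 ≤ m := by omega
  have hfd : PySem.Int.floordiv i 2 = ((m / 2 : Nat) : Int) := by
    rw [hcast]; exact_mod_cast PySem.Int.floordiv_natCast m 2
  rw [is_prime, hfd, Int.toNat_natCast, is_primeAux_iff, prime_iff_no_small_div m hm2]
  constructor
  · intro h k hk2 hkle hdvd
    refine h k hk2 hkle ?_
    rw [PySem.Int.mod_eq_zero_iff_dvd, hcast]
    exact_mod_cast hdvd
  · intro h k hk2 hkle hmod
    refine h k hk2 hkle ?_
    rw [PySem.Int.mod_eq_zero_iff_dvd, hcast] at hmod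
    exact_mod_cast hmod

/-- membership in the accumulated `re` list of `find_largest_prime_factor (find_factors n)` -/
theorem mem_re_iff (n x : Int) :
    x ∈ ((find_factors n).foldl
        (fun re i => if is_prime i (PySem.Int.floordiv i 2) then re ++ [i] else re) []) ↔
      (2 ≤ x ∧ x < n + 1) ∧ PySem.Int.mod n x = 0 ∧
        is_prime x (PySem.Int.floordiv x 2) = true := by
  rw [PySem.List.foldl_append_if_eq_filter, find_factors_eq]
  simp only [List.mem_filter, List.mem_append, PySem.List.mem_pyRange_one,
    List.not_mem_nil, false_or, beq_iff_eq]
  tauto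

theorem find_f_isGPF (n : Int) (hn : 2 ≤ n) : 0 ≤ find_f n ∧ IsGPF n.toNat (find_f n).toNat := by
  set m := n.toNat with hmdef
  have hcast : n = (m : Int) := by omega
  have hm2 : 2 ≤ m := by omega
  set re := ((find_factors n).foldl
      (fun re i => if is_prime i (PySem.Int.floordiv i 2) then re ++ [i] else re) []) with hre
  -- a prime Nat divisor of m is in re
  have hmem : ∀ p : Nat, p.Prime → p ∣ m → (p : Int) ∈ re := by
    intro p hp hpd
    rw [hre, mem_re_iff]
    have hp2 : 2 ≤ p := hp.two_le
    have hpm : p ≤ m := Nat.le_of_dvd (by omega) hpd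
    refine ⟨⟨by exact_mod_cast hp2, by omega⟩, ?_, ?_⟩
    · rw [PySem.Int.mod_eq_zero_iff_dvd, hcast]; exact_mod_cast hpd
    · rw [is_prime_iff (p : Int) (by exact_mod_cast hp2)]
      simpa using hp
  have hne : re ≠ [] := by
    intro hnil
    have := hmem m.minFac (Nat.minFac_prime (by omega)) (Nat.minFac_dvd m)
    rw [hnil] at this; exact absurd this (List.not_mem_nil)
  obtain ⟨r, hr⟩ : ∃ r, PySem.List.max? re (fun x => x) = some r := by
    cases hmax : PySem.List.max? re (fun x => x) with
    | none => exact absurd ((PySem.List.max?_eq_none_iff re _).mp hmax) hne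
    | some r => exact ⟨r, rfl⟩
  have hrmem : r ∈ re := PySem.List.max?_mem hr
  have hrmax : ∀ y ∈ re, y ≤ r := PySem.List.max?_isMax hr
  obtain ⟨⟨hr2, hrlt⟩, hrmod, hrprime⟩ := (mem_re_iff n r).mp hrmem
  have hval : find_f n = r := by
    rw [find_f, find_largest_prime_factor, ← hre]
    have : 0 < re.length := List.length_pos_of_ne_nil hne
    simp [this, hr]
  rw [hval]
  refine ⟨by omega, ?_, ?_, ?_⟩
  · rw [← is_prime_iff r hr2]; exact hrprime
  · have : (r : Int) ∣ n := (PySem.Int.mod_eq_zero_iff_dvd n r).mp hrmod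
    rw [hcast] at this
    have h0 : r = ((r.toNat : Nat) : Int) := by omega
    rw [h0] at this
    exact_mod_cast this
  · intro p hp hpd
    have := hrmax (p : Int) (hmem p hp hpd)
    omega

theorem find_f_eq_lpf (n : Int) : find_f n = lpf n := by
  by_cases hn : n < 2
  · have hnil : PySem.List.pyRange 2 (n + 1) 1 = [] := PySem.List.pyRange_one_eq_nil (by omega)
    rw [find_f, find_factors, hnil, lpf, if_pos hn]
    simp [find_largest_prime_factor]
  · replace hn : 2 ≤ n := by omega
    have hA := find_f_isGPF n hn
    have hB : IsGPF n.toNat (lpfLoopF (2 * n.toNat + 1) n.toNat 2) :=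
      lpfLoopF_isGPF (2 * n.toNat + 1) n.toNat 2 (by omega) (by omega) le_rfl
        (fun p hp _ => hp.two_le)
    have heq : (find_f n).toNat = lpfLoopF (2 * n.toNat + 1) n.toNat 2 :=
      IsGPF_unique hA.2 hB
    rw [lpf, if_neg (by omega), ← heq, Int.toNat_of_nonneg hA.1]

-- ===== VERDICT (by name: the statements are the Claim_ definitions above) =====
theorem find_g_spec : Claim_equal_find_g := by
  intro num _ _
  unfold Spec_find_g
  have hR : PySem.List.pyRange num (num + 9) 1 =
      [num, num + 1, num + 2, num + 3, num + 4, num + 5, num + 6, num + 7, num + 8] := by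
    rw [PySem.List.pyRange_one_cons (by omega), PySem.List.pyRange_one_cons (by omega),
        PySem.List.pyRange_one_cons (by omega), PySem.List.pyRange_one_cons (by omega),
        PySem.List.pyRange_one_cons (by omega), PySem.List.pyRange_one_cons (by omega),
        PySem.List.pyRange_one_cons (by omega), PySem.List.pyRange_one_cons (by omega),
        PySem.List.pyRange_one_cons (by omega), PySem.List.pyRange_one_eq_nil (by omega)]
    norm_num
    omega
  rw [find_g_alt, hR]
  simp only [List.foldl]
  rw [find_g]
  simp only [find_gLoop]
  norm_num [PySem.List.pyGetD, PySem.List.pyGet?, PySem.List.pyIdx?, find_f_eq_lpf]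
  norm_num [List.getElem_cons_succ, List.getElem_cons_zero, Int.toNat]
  ring_nf

set_option maxRecDepth 200000 in
@[simp] theorem find_g_raises : Claim_raises_find_g := by
  unfold Claim_raises_find_g
  exact ⟨fun num _ hr hp => by rw [Raises_find_g] at hr; rw [Pre_find_g] at hp; simp [hr] at hp,
         by decide⟩
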